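-- pv_equiv track=rewrite | github.com/megretj/AdventOfCode2023 | Day11.py | scaleCol
-- ===== SOURCE A (Python) =====
-- def scaleCol(image):
--     EmptyCols = []
--     for col in range(len(image[0])):
--         emptyCol = True
--         for row in image:
--             if row[col] != '.':
--                 emptyCol = False
--         if emptyCol:
--             EmptyCols.append(1000000)
--         else:
--             EmptyCols.append(1)
--     return EmptyCols
-- ===== SOURCE B (Python) =====
-- def scaleCol(image):
--     cols = len(image[0])
--     nonEmpty = set()
--     for row in image:
--         for i, ch in enumerate(row):
--             if ch != '.':
--                 nonEmpty.add(i)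
--     return [1 if c in nonEmpty else 1000000 for c in range(cols)]
-- ===== Notes on version B (the rewrite author's own statement) =====
-- stated objective: faster
-- what changed: Instead of rescanning every row once per column (column-major nested scan), B makes one row-major pass building a set of non-empty column indices, then emits the result in a single pass over the column range.
import Mathlib
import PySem

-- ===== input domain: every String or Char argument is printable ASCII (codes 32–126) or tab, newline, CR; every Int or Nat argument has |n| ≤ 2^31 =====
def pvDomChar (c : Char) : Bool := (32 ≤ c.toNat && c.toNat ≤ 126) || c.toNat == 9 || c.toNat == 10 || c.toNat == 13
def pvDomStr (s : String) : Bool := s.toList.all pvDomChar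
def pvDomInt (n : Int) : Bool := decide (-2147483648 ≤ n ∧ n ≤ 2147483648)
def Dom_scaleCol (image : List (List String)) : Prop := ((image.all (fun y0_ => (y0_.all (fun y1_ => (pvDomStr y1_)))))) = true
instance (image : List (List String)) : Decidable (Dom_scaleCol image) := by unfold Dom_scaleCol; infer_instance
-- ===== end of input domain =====

-- B builds the set of non-empty column indices in one row-major pass, then emits the
-- scale list in a single pass over the column range (objective: faster by access pattern).

-- ===== PORT A =====
def scaleCol (image : List (List String)) : List Int :=
  (PySem.List.pyRange 0 ((image.headD []).length : Int) 1).foldl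
    (fun acc col =>
      let emptyCol := image.foldl
        (fun e row => if PySem.List.pyGetD row col "" ≠ "." then false else e) true
      if emptyCol then acc ++ [(1000000 : Int)] else acc ++ [(1 : Int)])
    []

-- ===== PORT B =====
def scaleCol_alt (image : List (List String)) : List Int :=
  let cols : Int := ((image.headD []).length : Int)
  let nonEmpty : PySem.Set Int :=
    image.foldl (fun s row =>
      (PySem.List.enumerate row 0).foldl
        (fun s p => if p.2 ≠ "." then PySem.Set.add s p.1 else s) s)
      PySem.Set.empty
  (PySem.List.pyRange 0 cols 1).map
    (fun c => if PySem.Set.contains nonEmpty c then (1 : Int) else 1000000)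

-- ===== PRECONDITION & SPEC =====
-- Pre_ excludes exactly the inputs where the Python A raises: image[0] on an empty image,
-- and row[col] on a row shorter than the first row.
def Pre_scaleCol (image : List (List String)) : Prop :=
  image ≠ [] ∧ ∀ row ∈ image, (image.headD []).length ≤ row.length
instance (image : List (List String)) : Decidable (Pre_scaleCol image) := by
  unfold Pre_scaleCol; infer_instance
def pvWitness_scaleCol : List (List String) := [["#", "."], [".", "."]]

def Spec_scaleCol (image : List (List String)) (out : List Int) : Prop := out = scaleCol_alt image
instance (image : List (List String)) (out : List Int) : Decidable (Spec_scaleCol image out) := by unfold Spec_scaleCol; infer_instance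

-- ===== CLAIM (what is proved, stated in full; the proofs are below) =====
def Claim_equal_scaleCol : Prop := ∀ (image : List (List String)), Dom_scaleCol image → Pre_scaleCol image → Spec_scaleCol image (scaleCol image)

-- ===== LEMMAS AND PROOFS =====

-- A's inner fold over the rows: the flag stays true iff it started true and every row has '.' at col.
lemma scaleCol_inner_fold (rows : List (List String)) (col : Int) (e : Bool) :
    rows.foldl (fun e row => if PySem.List.pyGetD row col "" ≠ "." then false else e) e
      = (e && rows.all (fun row => PySem.List.pyGetD row col "" == ".")) := by
  induction rows generalizing e with
  | nil => simp
  | cons r rs ih =>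
    simp only [List.foldl_cons, List.all_cons, ih]
    by_cases h : PySem.List.pyGetD r col "" = "."
    · simp [h]
    · simp [h]

-- membership in B's inner (per-row) fold
lemma mem_row_fold (row : List String) (k : Int) (s : PySem.Set Int) (c : Int) :
    c ∈ (PySem.List.enumerate row k).foldl
          (fun s p => if p.2 ≠ "." then PySem.Set.add s p.1 else s) s
      ↔ c ∈ s ∨ ∃ j : Nat, j < row.length ∧ row.getD j "" ≠ "." ∧ c = k + j := by
  induction row generalizing k s with
  | nil => simp [PySem.List.enumerate_nil]
  | cons x xs ih =>
    rw [PySem.List.enumerate_cons]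
    simp only [List.foldl_cons]
    by_cases hx : x = "."
    · simp only [hx, ne_eq, not_true_eq_false, if_false, ih]
      constructor
      · rintro (hc | ⟨j, hj, hne, hc⟩)
        · exact Or.inl hc
        · refine Or.inr ⟨j + 1, by simpa using hj, by simpa using hne, ?_⟩
          omega
      · rintro (hc | ⟨j, hj, hne, hc⟩)
        · exact Or.inl hc
        · cases j with
          | zero => exact (hne (by simp)).elim
          | succ j =>
            refine Or.inr ⟨j, by simpa using hj, by simpa using hne, ?_⟩
            omega
    · simp only [ne_eq, hx, not_false_eq_true, if_true, ih, PySem.Set.mem_add]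
      constructor
      · rintro ((hc | hc) | ⟨j, hj, hne, hc⟩)
        · exact Or.inl hc
        · exact Or.inr ⟨0, by simp, by simpa using hx, by simp [hc]⟩
        · refine Or.inr ⟨j + 1, by simpa using hj, by simpa using hne, ?_⟩
          omega
      · rintro (hc | ⟨j, hj, hne, hc⟩)
        · exact Or.inl (Or.inl hc)
        · cases j with
          | zero => exact Or.inl (Or.inr (by simpa using hc))
          | succ j =>
            refine Or.inr ⟨j, by simpa using hj, by simpa using hne, ?_⟩
            omega

-- membership in B's full nonEmpty set
lemma mem_nonEmpty_fold (rows : List (List String)) (s : PySem.Set Int) (c : Int) :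
    c ∈ rows.foldl (fun s row =>
          (PySem.List.enumerate row 0).foldl
            (fun s p => if p.2 ≠ "." then PySem.Set.add s p.1 else s) s) s
      ↔ c ∈ s ∨ ∃ row ∈ rows, ∃ j : Nat, j < row.length ∧ row.getD j "" ≠ "." ∧ c = (j : Int) := by
  induction rows generalizing s with
  | nil => simp
  | cons r rs ih =>
    simp only [List.foldl_cons, ih, mem_row_fold, zero_add]
    constructor
    · rintro ((h | ⟨j, hj, hne, hc⟩) | h)
      · exact Or.inl h
      · exact Or.inr ⟨r, by simp, j, hj, hne, hc⟩
      · obtain ⟨row, hrow, j, hj, hne, hc⟩ := h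
        exact Or.inr ⟨row, by simp [hrow], j, hj, hne, hc⟩
    · rintro (h | ⟨row, hrow, j, hj, hne, hc⟩)
      · exact Or.inl (Or.inl h)
      · rcases List.mem_cons.mp hrow with h | h
        · exact Or.inl (Or.inr ⟨j, by rw [← h]; exact ⟨hj, hne, hc⟩⟩)
        · exact Or.inr ⟨row, h, j, hj, hne, hc⟩

lemma pyGetD_in_range (row : List String) (c : Int) (h0 : 0 ≤ c) :
    PySem.List.pyGetD row c "" = row.getD c.toNat "" := by
  have h := PySem.List.pyGetD_natCast (xs := row) (n := c.toNat) (d := "")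
  rwa [Int.toNat_of_nonneg h0] at h

-- ===== VERDICT (by name: the statement is the Claim_ definition above) =====
theorem scaleCol_spec : Claim_equal_scaleCol := by
  intro image _ hpre
  obtain ⟨hne, hlen⟩ := hpre
  unfold Spec_scaleCol scaleCol scaleCol_alt
  have hbody : ∀ (acc : List Int) (col : Int),
      (let emptyCol := image.foldl
          (fun e row => if PySem.List.pyGetD row col "" ≠ "." then false else e) true
       if emptyCol then acc ++ [(1000000 : Int)] else acc ++ [(1 : Int)])
      = acc ++ [if image.all (fun row => PySem.List.pyGetD row col "" == ".") then (1000000 : Int) else 1] := by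
    intro acc col
    simp only [scaleCol_inner_fold, Bool.true_and]
    split_ifs <;> rfl
  simp only [hbody]
  rw [PySem.List.foldl_append_singleton_eq_map]
  simp only [List.nil_append]
  apply List.map_congr_left
  intro c hc
  rw [PySem.List.mem_pyRange_one] at hc
  have hmem : PySem.Set.contains
      (image.foldl (fun s row =>
        (PySem.List.enumerate row 0).foldl
          (fun s p => if p.2 ≠ "." then PySem.Set.add s p.1 else s) s) PySem.Set.empty) c = true
      ↔ ∃ row ∈ image, ∃ j : Nat, j < row.length ∧ row.getD j "" ≠ "." ∧ c = (j : Int) := by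
    rw [PySem.Set.contains_iff, mem_nonEmpty_fold]
    simp [PySem.Set.empty]
  by_cases hall : image.all (fun row => PySem.List.pyGetD row c "" == ".") = true
  · rw [if_pos hall, if_neg]
    rw [hmem]
    rintro ⟨row, hrow, j, hj, hjne, hcj⟩
    rw [List.all_eq_true] at hall
    have h1 := hall row hrow
    rw [beq_iff_eq, pyGetD_in_range row c hc.1] at h1
    have hcn : c.toNat = j := by omega
    rw [hcn] at h1
    exact hjne h1
  · rw [if_neg hall, if_pos]
    rw [hmem]
    rw [List.all_eq_true] at hall
    push Not at hall
    obtain ⟨row, hrow, hrne⟩ := hall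
    have hrne' : row.getD c.toNat "" ≠ "." := fun h =>
      hrne (by rw [beq_iff_eq, pyGetD_in_range row c hc.1]; exact h)
    have hlenr := hlen row hrow
    have hjlt : c.toNat < row.length := by omega
    exact ⟨row, hrow, c.toNat, hjlt, hrne', by omega⟩
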